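-- pv_equiv track=rewrite | github.com/andrebdinis/boilerplate-budget-app | budget.py | constructChartNameLabels
-- ===== SOURCE A (Python) =====
-- def getMaxCategoryNameLengthFromSortedPercentagesDictList(percentagesList):
--   maxNameLengthDict = max(percentagesList, key=lambda item: len(item["name"]))
--   return len(maxNameLengthDict["name"])
--
-- def constructChartNameLabels(percentagesList):
--   labelsPart = ""
--   labelDiv = "".rjust(5, " ")
--   empty = "   "
--   labelMaxHeight = getMaxCategoryNameLengthFromSortedPercentagesDictList(percentagesList)
--   letterIndex = 0
--   while letterIndex < labelMaxHeight:
--     labelsPart += labelDiv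
--     for item in percentagesList:
--       if letterIndex < len(item["name"]):
--         labelsPart += item["name"][letterIndex] + "  "
--       else:
--         labelsPart += empty
--     if letterIndex+1 < labelMaxHeight: labelsPart += "\n"
--     letterIndex += 1
--   return labelsPart
-- ===== SOURCE B (Python) =====
-- def constructChartNameLabels(percentagesList):
--     names = [item["name"] for item in percentagesList]
--     height = max(map(len, names))
--     rows = ["     "] * height
--     for name in names:
--         padded = name + " " * (height - len(name))
--         rows = [row + c + "  " for row, c in zip(rows, padded)]
--     return "\n".join(rows)
-- ===== Notes on version B (the rewrite author's own statement) =====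
-- stated objective: alternative
-- what changed: Transposed traversal: A's row-major while-loop (rows outer, items inner, per-cell length branch, string accumulator, manual newline placement) becomes an item-by-item fold that zips each right-padded name into a list of row accumulators and joins the rows at the end.
import Mathlib
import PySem

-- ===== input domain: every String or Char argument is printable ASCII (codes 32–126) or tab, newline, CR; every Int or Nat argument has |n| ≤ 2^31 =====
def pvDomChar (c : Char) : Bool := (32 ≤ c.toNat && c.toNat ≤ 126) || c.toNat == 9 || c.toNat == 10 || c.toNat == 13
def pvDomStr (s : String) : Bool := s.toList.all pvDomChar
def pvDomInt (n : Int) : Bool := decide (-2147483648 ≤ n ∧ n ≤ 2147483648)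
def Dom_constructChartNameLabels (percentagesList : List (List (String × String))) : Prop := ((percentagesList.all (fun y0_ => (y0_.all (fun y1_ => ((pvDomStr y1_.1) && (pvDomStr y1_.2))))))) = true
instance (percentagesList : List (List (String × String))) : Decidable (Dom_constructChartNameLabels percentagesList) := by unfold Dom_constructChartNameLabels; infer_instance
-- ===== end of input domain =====

-- B transposes the traversal: instead of A's row-major while-loop with a per-cell length branch,
-- it folds item-by-item over a list of row accumulators, zipping each padded name into all rows
-- at once, and joins the rows at the end — alternative decomposition, same cost.


-- ===== PORT A =====
-- item["name"] on a dict-as-association-list: first match; Pre_ guarantees the key is present,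
-- so the default "" of getD is never used.
def pvName (item : List (String × String)) : List Char :=
  ((item.lookup "name").getD "").toList

-- port of getMaxCategoryNameLengthFromSortedPercentagesDictList:
-- max(percentagesList, key=lambda item: len(item["name"])), then len of its "name".
-- The none branch is unreachable under Pre_ (Python raises ValueError on an empty list).
def pvMaxLenA (percentagesList : List (List (String × String))) : Nat :=
  match PySem.List.max? percentagesList (fun it => (pvName it).length) with
  | some m => (pvName m).length
  | none => 0

-- the while-loop of A, step for step on List Char (labelDiv = 5 spaces, empty = 3 spaces);
-- item["name"][letterIndex] is guarded by the same `i < len` branch as in Python, so getD is exact.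
def pvLoopA (pl : List (List (String × String))) (H : Nat) (i : Nat) (acc : List Char) : List Char :=
  if _h : i < H then
    let acc := acc ++ List.replicate 5 ' '
    let acc := pl.foldl (fun a it =>
      if i < (pvName it).length then a ++ [(pvName it).getD i ' ', ' ', ' ']
      else a ++ [' ', ' ', ' ']) acc
    let acc := if i + 1 < H then acc ++ ['\n'] else acc
    pvLoopA pl H (i + 1) acc
  else acc
termination_by H - i

def constructChartNameLabels (percentagesList : List (List (String × String))) : String :=
  String.ofList (pvLoopA percentagesList (pvMaxLenA percentagesList) 0 [])

-- ===== PORT B =====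
-- max(map(len, names)): running max over the lengths (0 branch unreachable under Pre_,
-- where Python raises ValueError on the empty list)
def pvMaxLenB (names : List (List Char)) : Nat :=
  match names.map List.length with
  | [] => 0
  | x :: xs => xs.foldl max x

-- name + " " * (height - len(name)): pad on the right with spaces (Nat subtraction = Python's
-- non-negative difference, since height is the maximum length)
def pvLjust (cs : List Char) (w : Nat) : List Char :=
  cs ++ List.replicate (w - cs.length) ' '

-- rows = [row + c + "  " for row, c in zip(rows, padded)]
def pvStep (h : Nat) (rows : List (List Char)) (name : List Char) : List (List Char) :=
  ((rows.zip (pvLjust name h)).map (fun p => p.1 ++ [p.2, ' ', ' ']))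

def constructChartNameLabels_alt (percentagesList : List (List (String × String))) : String :=
  -- names = [...]; height = max(...); fold the rows over the names; "\n".join(rows)
  String.ofList (List.intercalate ['\n']
    ((percentagesList.map pvName).foldl (pvStep (pvMaxLenB (percentagesList.map pvName)))
      (List.replicate (pvMaxLenB (percentagesList.map pvName)) (List.replicate 5 ' '))))

-- ===== PRECONDITION & SPEC =====
-- Pre_ excludes exactly the inputs where Python A raises: the empty list (ValueError from max)
-- and lists with an item lacking the "name" key (KeyError).
def Pre_constructChartNameLabels (percentagesList : List (List (String × String))) : Prop :=
  percentagesList ≠ [] ∧ ∀ it ∈ percentagesList, (it.lookup "name").isSome = true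
instance (percentagesList : List (List (String × String))) : Decidable (Pre_constructChartNameLabels percentagesList) := by unfold Pre_constructChartNameLabels; infer_instance

def pvWitness_constructChartNameLabels : (List (List (String × String))) :=
  [[("name", "Food")], [("name", "Rent")]]

def Spec_constructChartNameLabels (percentagesList : List (List (String × String))) (out : String) : Prop := out = constructChartNameLabels_alt percentagesList
instance (percentagesList : List (List (String × String))) (out : String) : Decidable (Spec_constructChartNameLabels percentagesList out) := by unfold Spec_constructChartNameLabels; infer_instance

-- ===== CLAIM (what is proved, stated in full; the proofs are below) =====
def Claim_equal_constructChartNameLabels : Prop := ∀ (percentagesList : List (List (String × String))), Dom_constructChartNameLabels percentagesList → Pre_constructChartNameLabels percentagesList → Spec_constructChartNameLabels percentagesList (constructChartNameLabels percentagesList)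

-- ===== LEMMAS AND PROOFS =====

theorem len_le_maxB (ns : List (List Char)) (n : List Char)
    (h : n ∈ ns) : n.length ≤ pvMaxLenB ns := by
  match ns, h with
  | p :: ps, h =>
    simp only [pvMaxLenB, List.map_cons]
    rcases List.mem_cons.mp h with rfl | h
    · exact (PySem.List.le_foldl_max (ps.map List.length) _).1
    · exact (PySem.List.le_foldl_max (ps.map List.length) _).2 _ (List.mem_map_of_mem h)

theorem pvMaxLen_eq (pl : List (List (String × String))) (h : pl ≠ []) :
    pvMaxLenA pl = pvMaxLenB (pl.map pvName) := by
  obtain ⟨m, hm⟩ : ∃ m, PySem.List.max? pl (fun it => (pvName it).length) = some m := by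
    rcases hmo : PySem.List.max? pl (fun it => (pvName it).length) with _ | m
    · exact absurd ((PySem.List.max?_eq_none_iff _ _).mp hmo) h
    · exact ⟨m, rfl⟩
  have hmem : m ∈ pl := PySem.List.max?_mem hm
  have hmax : ∀ y ∈ pl, (pvName y).length ≤ (pvName m).length := by
    intro y hy; exact PySem.List.max?_isMax hm y hy
  apply Nat.le_antisymm
  · simpa [pvMaxLenA, hm] using len_le_maxB (pl.map pvName) (pvName m) (List.mem_map_of_mem hmem)
  · simp only [pvMaxLenA, hm]
    match pl, h with
    | p :: ps, _ =>
      have hthis : pvMaxLenB ((p :: ps).map pvName)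
          = ((ps.map pvName).map List.length).foldl max (pvName p).length := rfl
      rw [hthis]
      rcases PySem.List.foldl_max_mem ((ps.map pvName).map List.length) ((pvName p).length) with heq | hin
      · rw [heq]; exact hmax p (List.mem_cons_self ..)
      · obtain ⟨y, hy, hyeq⟩ := List.mem_map.mp hin
        obtain ⟨z, hz, rfl⟩ := List.mem_map.mp hy
        rw [← hyeq]; exact hmax z (List.mem_cons_of_mem _ hz)

theorem pvLjust_length (n : List Char) (h : Nat) (hn : n.length ≤ h) :
    (pvLjust n h).length = h := by
  simp [pvLjust]; omega

theorem cell_eq (n : List Char) (i h : Nat) (hi : i < h) (hn : n.length ≤ h) :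
    [(pvLjust n h).getD i ' ', ' ', ' ']
      = if i < n.length then [n.getD i ' ', ' ', ' '] else [' ', ' ', ' '] := by
  unfold pvLjust
  split_ifs with hin
  · simp [List.getD, List.getElem?_append_left hin]
  · have : (n ++ List.replicate (h - n.length) ' ').getD i ' ' = ' ' := by
      have h1 : i - n.length < h - n.length := by omega
      simp [List.getD, List.getElem?_append_right (by omega : n.length ≤ i), h1]
    simpa [List.getD] using this

-- one pvStep on rows given as a map over range h
theorem step_eq (f : Nat → List Char) (n : List Char) (h : Nat) (hn : n.length ≤ h) :
    pvStep h ((List.range h).map f) n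
      = (List.range h).map (fun i => f i ++ [(pvLjust n h).getD i ' ', ' ', ' ']) := by
  apply List.ext_getElem
  · simp [pvStep, pvLjust_length n h hn]
  · intro i h1 h2
    have hih : i < h := by simpa using h2
    have hpad : i < (pvLjust n h).length := by rw [pvLjust_length n h hn]; exact hih
    simp [pvStep, List.getD, List.getElem?_eq_getElem hpad]

-- the whole fold of pvStep, characterised as a map over range h
theorem fold_eq (ns : List (List Char)) (h : Nat) (hlen : ∀ n ∈ ns, n.length ≤ h) :
    ∀ (f : Nat → List Char),
    ns.foldl (pvStep h) ((List.range h).map f)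
      = (List.range h).map (fun i =>
          f i ++ (ns.map (fun n => [(pvLjust n h).getD i ' ', ' ', ' '])).flatten) := by
  induction ns with
  | nil => intro f; simp
  | cons n ns ih =>
    intro f
    simp only [List.foldl_cons]
    rw [step_eq f n h (hlen n (List.mem_cons_self ..))]
    rw [ih (fun m hm => hlen m (List.mem_cons_of_mem _ hm))]
    simp [List.append_assoc]

theorem row_eq (pl : List (List (String × String))) (i h : Nat) (hi : i < h)
    (hlen : ∀ it ∈ pl, (pvName it).length ≤ h) (acc : List Char) :
    pl.foldl (fun a it =>
      if i < (pvName it).length then a ++ [(pvName it).getD i ' ', ' ', ' ']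
      else a ++ [' ', ' ', ' ']) acc
    = acc ++ ((pl.map pvName).map (fun n => [(pvLjust n h).getD i ' ', ' ', ' '])).flatten := by
  induction pl generalizing acc with
  | nil => simp
  | cons p ps ih =>
    simp only [List.foldl_cons, List.map_cons, List.flatten_cons]
    rw [ih (fun it hit => hlen it (List.mem_cons_of_mem _ hit))]
    rw [cell_eq (pvName p) i h hi (hlen p (List.mem_cons_self ..))]
    split_ifs <;> simp

theorem loop_eq (pl : List (List (String × String))) (h : Nat)
    (hlen : ∀ it ∈ pl, (pvName it).length ≤ h) :
    ∀ (k i : Nat) (acc : List Char), i + k = h →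
    pvLoopA pl h i acc
      = acc ++ List.intercalate ['\n'] ((List.range' i k).map (fun j =>
          List.replicate 5 ' ' ++ ((pl.map pvName).map (fun n => [(pvLjust n h).getD j ' ', ' ', ' '])).flatten)) := by
  intro k
  induction k with
  | zero =>
    intro i acc hik
    rw [pvLoopA]
    simp [show ¬ i < h by omega, List.intercalate]
  | succ k ih =>
    intro i acc hik
    rw [pvLoopA]
    have hi : i < h := by omega
    simp only [hi, dif_pos]
    rw [row_eq pl i h hi hlen]
    rw [ih (i+1) _ (by omega)]
    rcases Nat.eq_zero_or_pos k with rfl | hk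
    · have : ¬ i + 1 < h := by omega
      simp [this, List.range'_succ, List.intercalate]
    · obtain ⟨k', rfl⟩ : ∃ k', k = k' + 1 := ⟨k - 1, by omega⟩
      have h2 : i + 1 < h := by omega
      simp only [h2, if_pos, List.range'_succ, List.map_cons]
      simp [List.intercalate, List.intersperse]

-- ===== VERDICT (by name: the statement is the Claim_ definition above) =====
theorem constructChartNameLabels_spec : Claim_equal_constructChartNameLabels := by
  intro pl _dom hpre
  unfold Spec_constructChartNameLabels constructChartNameLabels constructChartNameLabels_alt
  rw [pvMaxLen_eq pl hpre.1]
  have hlen : ∀ it ∈ pl, (pvName it).length ≤ pvMaxLenB (pl.map pvName) :=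
    fun it hit => len_le_maxB _ _ (List.mem_map_of_mem hit)
  rw [loop_eq pl (pvMaxLenB (pl.map pvName)) hlen (pvMaxLenB (pl.map pvName)) 0 [] (by omega)]
  rw [show (List.replicate (pvMaxLenB (pl.map pvName)) (List.replicate 5 ' '))
      = (List.range (pvMaxLenB (pl.map pvName))).map (fun _ => List.replicate 5 ' ') by
    simp [List.map_const']]
  rw [fold_eq (pl.map pvName) (pvMaxLenB (pl.map pvName))
      (fun n hn => by obtain ⟨it, hit, rfl⟩ := List.mem_map.mp hn; exact hlen it hit)]
  simp [List.range_eq_range']
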